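-- pv_equiv track=rewrite | github.com/henriquecatani/aprendendo-python | atividades/resol2.py | valorEmNotas
-- ===== SOURCE A (Python) =====
-- def valorEmNotas(valor, isSpecial = 0):
--     valor_b = valor - 6
--     n100 = valor // 100
--     valor = valor - n100 * 100
--     n50 = valor // 50
--     valor = valor - n50 * 50
--     n20 = valor // 20
--     valor = valor - n20 * 20
--     n10 = valor // 10
--     valor = valor - n10 * 10
--     n5 = valor // 5
--     valor = valor - n5 * 5
--     n2 = valor // 2
--     valor = valor - n2 * 2
--     if isSpecial == 1: #somente quando chamado por essa própria função mais adiante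
--         n2 += 3
--     if valor == 0:
--         return "{} notas de 100, {} notas de 50, {} notas de 20, {} notas de 10, {} notas de 5 e {} notas de 2".format(n100, n50, n20, n10, n5, n2)
--     else:
--         return valorEmNotas(valor_b, 1) # garante que o algoritmo utilize 3*n2 ao invés de 1*5 + 1
-- ===== SOURCE B (Python) =====
-- def valorEmNotas(valor, isSpecial = 0):
--     special = isSpecial == 1
--     # The greedy breakdown leaves a remainder of 1 exactly when valor % 10 is 1, 3, 6 or 8;
--     # one retry on valor - 6 (paying the difference with three 2-notes) always succeeds.
--     if valor % 10 in (1, 3, 6, 8):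
--         valor -= 6
--         special = True
--     counts = []
--     for d in (100, 50, 20, 10, 5, 2):
--         counts.append(valor // d)
--         valor %= d
--     if special:
--         counts[5] += 3
--     return "{} notas de 100, {} notas de 50, {} notas de 20, {} notas de 10, {} notas de 5 e {} notas de 2".format(*counts)
-- ===== Notes on version B (the rewrite author's own statement) =====
-- stated objective: simpler
-- what changed: B replaces A's unrolled subtract-and-mutate chain plus unconditional self-recursion by a non-recursive version: it tests up front whether valor % 10 is 1, 3, 6 or 8 (exactly the cases where greedy leaves remainder 1), adjusts valor and the special flag once, and then computes all note counts with one table-driven loop over the denominations.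
import Mathlib
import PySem

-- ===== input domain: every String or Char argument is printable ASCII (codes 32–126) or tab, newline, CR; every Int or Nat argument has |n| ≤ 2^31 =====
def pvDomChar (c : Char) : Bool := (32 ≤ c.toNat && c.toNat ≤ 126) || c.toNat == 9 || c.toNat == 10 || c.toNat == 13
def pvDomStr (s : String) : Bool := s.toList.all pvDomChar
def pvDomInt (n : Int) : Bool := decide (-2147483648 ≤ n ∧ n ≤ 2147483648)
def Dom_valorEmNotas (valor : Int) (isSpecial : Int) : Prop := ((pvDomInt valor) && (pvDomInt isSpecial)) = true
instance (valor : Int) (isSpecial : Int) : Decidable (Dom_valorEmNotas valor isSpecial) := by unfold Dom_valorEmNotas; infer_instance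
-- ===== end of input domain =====

-- B drops A's unconditional self-recursion: it tests valor % 10 up front and computes the
-- counts with one table-driven loop over the denominations (objective: simpler).


-- ===== PORT A =====
-- the shared format template "{} notas de 100, … e {} notas de 2".format(…)
def fmtNotas (n100 n50 n20 n10 n5 n2 : Int) : String :=
  String.ofList (PySem.Int.toChars n100 ++ " notas de 100, ".toList
    ++ PySem.Int.toChars n50 ++ " notas de 50, ".toList
    ++ PySem.Int.toChars n20 ++ " notas de 20, ".toList
    ++ PySem.Int.toChars n10 ++ " notas de 10, ".toList
    ++ PySem.Int.toChars n5 ++ " notas de 5 e ".toList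
    ++ PySem.Int.toChars n2 ++ " notas de 2".toList)

-- A's recursion has no structural decrease; the fuel only makes it total (Python's own
-- recursion limit plays the same role) and is never exhausted (the proof shows the
-- recursion is at most one level deep).
def valorEmNotasGo : Nat → Int → Int → String
  | 0, _, _ => ""
  | fuel + 1, valor, isSpecial =>
    let valor_b := valor - 6
    let n100 := PySem.Int.floordiv valor 100
    let valor := valor - n100 * 100
    let n50 := PySem.Int.floordiv valor 50
    let valor := valor - n50 * 50
    let n20 := PySem.Int.floordiv valor 20
    let valor := valor - n20 * 20
    let n10 := PySem.Int.floordiv valor 10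
    let valor := valor - n10 * 10
    let n5 := PySem.Int.floordiv valor 5
    let valor := valor - n5 * 5
    let n2 := PySem.Int.floordiv valor 2
    let valor := valor - n2 * 2
    let n2 := if isSpecial = 1 then n2 + 3 else n2
    if valor = 0 then
      fmtNotas n100 n50 n20 n10 n5 n2
    else
      valorEmNotasGo fuel valor_b 1

def valorEmNotas (valor : Int) (isSpecial : Int) : String :=
  valorEmNotasGo 1000 valor isSpecial

-- ===== PORT B =====
def valorEmNotas_alt (valor : Int) (isSpecial : Int) : String :=
  let special : Bool := isSpecial = 1
  let m := PySem.Int.mod valor 10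
  let (valor, special) :=
    if m = 1 ∨ m = 3 ∨ m = 6 ∨ m = 8 then (valor - 6, true) else (valor, special)
  let p := [(100 : Int), 50, 20, 10, 5, 2].foldl
    (fun (s : List Int × Int) d => (s.1 ++ [PySem.Int.floordiv s.2 d], PySem.Int.mod s.2 d))
    ([], valor)
  let counts := p.1
  let counts := if special then PySem.List.pySetD counts 5 (PySem.List.pyGetD counts 5 0 + 3) else counts
  match counts with
  | [a, b, c, d, e, f] => fmtNotas a b c d e f
  | _ => ""

-- ===== PRECONDITION & SPEC =====
def Spec_valorEmNotas (valor : Int) (isSpecial : Int) (out : String) : Prop := out = valorEmNotas_alt valor isSpecial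
instance (valor : Int) (isSpecial : Int) (out : String) : Decidable (Spec_valorEmNotas valor isSpecial out) := by unfold Spec_valorEmNotas; infer_instance

-- ===== CLAIM (what is proved, stated in full; the proofs are below) =====
def Claim_equal_valorEmNotas : Prop := ∀ (valor : Int) (isSpecial : Int), Dom_valorEmNotas valor isSpecial → Spec_valorEmNotas valor isSpecial (valorEmNotas valor isSpecial)

-- ===== LEMMAS AND PROOFS =====
theorem sub_ediv_mul (a d : Int) : a - a / d * d = a % d := by
  rw [Int.emod_def]; ring

-- one unfolding of A's body, with the subtract-and-mutate chain written as ediv/emod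
theorem go_succ (f : Nat) (v s : Int) :
    valorEmNotasGo (f+1) v s =
    if v % 100 % 50 % 20 % 10 % 5 % 2 = 0 then
      fmtNotas (v/100) (v%100/50) (v%100%50/20) (v%100%50%20/10) (v%100%50%20%10/5)
        (if s = 1 then v%100%50%20%10%5/2 + 3 else v%100%50%20%10%5/2)
    else valorEmNotasGo f (v-6) 1 := by
  simp only [valorEmNotasGo, sub_ediv_mul,
    PySem.Int.floordiv_eq_ediv_of_pos (b := 100) (by norm_num),
    PySem.Int.floordiv_eq_ediv_of_pos (b := 50) (by norm_num),
    PySem.Int.floordiv_eq_ediv_of_pos (b := 20) (by norm_num),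
    PySem.Int.floordiv_eq_ediv_of_pos (b := 10) (by norm_num),
    PySem.Int.floordiv_eq_ediv_of_pos (b := 5) (by norm_num),
    PySem.Int.floordiv_eq_ediv_of_pos (b := 2) (by norm_num)]

-- B's body in the same ediv/emod language
theorem alt_eq (v s : Int) :
    valorEmNotas_alt v s =
    if v % 10 = 1 ∨ v % 10 = 3 ∨ v % 10 = 6 ∨ v % 10 = 8 then
      fmtNotas ((v-6)/100) ((v-6)%100/50) ((v-6)%100%50/20) ((v-6)%100%50%20/10)
        ((v-6)%100%50%20%10/5) ((v-6)%100%50%20%10%5/2 + 3)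
    else
      fmtNotas (v/100) (v%100/50) (v%100%50/20) (v%100%50%20/10) (v%100%50%20%10/5)
        (if s = 1 then v%100%50%20%10%5/2 + 3 else v%100%50%20%10%5/2) := by
  simp only [valorEmNotas_alt, List.foldl,
    PySem.Int.mod_eq_emod_of_pos (b := 100) (by norm_num),
    PySem.Int.mod_eq_emod_of_pos (b := 50) (by norm_num),
    PySem.Int.mod_eq_emod_of_pos (b := 20) (by norm_num),
    PySem.Int.mod_eq_emod_of_pos (b := 10) (by norm_num),
    PySem.Int.mod_eq_emod_of_pos (b := 5) (by norm_num),
    PySem.Int.mod_eq_emod_of_pos (b := 2) (by norm_num),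
    PySem.Int.floordiv_eq_ediv_of_pos (b := 100) (by norm_num),
    PySem.Int.floordiv_eq_ediv_of_pos (b := 50) (by norm_num),
    PySem.Int.floordiv_eq_ediv_of_pos (b := 20) (by norm_num),
    PySem.Int.floordiv_eq_ediv_of_pos (b := 10) (by norm_num),
    PySem.Int.floordiv_eq_ediv_of_pos (b := 5) (by norm_num),
    PySem.Int.floordiv_eq_ediv_of_pos (b := 2) (by norm_num)]
  split_ifs with h1 h2 h3 <;>
    simp_all [PySem.List.pySetD, PySem.List.pySet?, PySem.List.pyGetD, PySem.List.pyIdx?]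

-- the nested remainder chain collapses to v % 10
theorem chain_mod10 (v : Int) : v % 100 % 50 % 20 % 10 = v % 10 := by
  rw [Int.emod_emod_of_dvd v (by norm_num : (50:Int) ∣ 100),
    Int.emod_emod_of_dvd (v % 50) (by norm_num : (10:Int) ∣ 20),
    Int.emod_emod_of_dvd v (by norm_num : (10:Int) ∣ 50)]

-- greedy leaves a remainder exactly for last digits 1, 3, 6, 8
theorem mem_of_residual (m : Int) (h0 : 0 ≤ m) (h1 : m < 10) (hr : ¬ m % 5 % 2 = 0) :
    m = 1 ∨ m = 3 ∨ m = 6 ∨ m = 8 := by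
  interval_cases m <;> omega

theorem not_mem_of_residual (m : Int) (h0 : 0 ≤ m) (h1 : m < 10) (hr : m % 5 % 2 = 0) :
    ¬ (m = 1 ∨ m = 3 ∨ m = 6 ∨ m = 8) := by
  interval_cases m <;> omega

theorem main_eq (v s : Int) : valorEmNotas v s = valorEmNotas_alt v s := by
  rw [valorEmNotas, show (1000:Nat) = 999+1 from rfl, go_succ, alt_eq]
  simp only [chain_mod10]
  by_cases hr : v % 10 % 5 % 2 = 0
  · rw [if_pos hr, if_neg (not_mem_of_residual (v % 10) (by omega) (by omega) hr)]
  · have hm := mem_of_residual (v % 10) (by omega) (by omega) hr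
    rw [if_neg hr, show (999:Nat) = 998+1 from rfl, go_succ]
    simp only [chain_mod10]
    rw [if_pos (show (v-6) % 10 % 5 % 2 = 0 by omega), if_pos hm]
    norm_num

-- ===== VERDICT (by name: the statement is the Claim_ definition above) =====
theorem valorEmNotas_spec : Claim_equal_valorEmNotas := by
  intro v s _
  exact main_eq v s
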